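-- pv_equiv track=rewrite | github.com/mauricelanghinrichs/memocell | memo_py/simulation_lib/sim_gillespie.py | create_node_summation_indices
-- ===== SOURCE A (Python) =====
-- def create_node_summation_indices(main_node_order, hidden_node_order):
--     """docstring for ."""
--
--     # for each main node, find indices of corresponding hidden nodes
--     sum_tuple_main = list()
--     for main_node in main_node_order:
--         tup_i = ()
--         for node_ind in range(len(hidden_node_order)):
--
--             # e.g., the following lines is True if 'Z_2__module_2__0'.split('__')[0] == 'Z_2'
--             if hidden_node_order[node_ind].split('__')[0]==main_node:
--                 tup_i += (node_ind, )
--         sum_tuple_main.append(tup_i)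
--
--     return sum_tuple_main
-- ===== SOURCE B (Python) =====
-- def create_node_summation_indices(main_node_order, hidden_node_order):
--     """docstring for ."""
--     # one pass: group hidden-node indices by their '__'-prefix, then one lookup per main node
--     groups = {}
--     for i, name in enumerate(hidden_node_order):
--         key = name.split('__')[0]
--         groups[key] = groups.get(key, []) + [i]
--     return [tuple(groups.get(m, [])) for m in main_node_order]
-- ===== Notes on version B (the rewrite author's own statement) =====
-- stated objective: faster
-- what changed: replaces the nested scan (for each main node, scan all hidden nodes) by a single pass that buckets hidden-node indices into a dict keyed by the '__'-prefix, followed by one dict lookup per main node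
import Mathlib
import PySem

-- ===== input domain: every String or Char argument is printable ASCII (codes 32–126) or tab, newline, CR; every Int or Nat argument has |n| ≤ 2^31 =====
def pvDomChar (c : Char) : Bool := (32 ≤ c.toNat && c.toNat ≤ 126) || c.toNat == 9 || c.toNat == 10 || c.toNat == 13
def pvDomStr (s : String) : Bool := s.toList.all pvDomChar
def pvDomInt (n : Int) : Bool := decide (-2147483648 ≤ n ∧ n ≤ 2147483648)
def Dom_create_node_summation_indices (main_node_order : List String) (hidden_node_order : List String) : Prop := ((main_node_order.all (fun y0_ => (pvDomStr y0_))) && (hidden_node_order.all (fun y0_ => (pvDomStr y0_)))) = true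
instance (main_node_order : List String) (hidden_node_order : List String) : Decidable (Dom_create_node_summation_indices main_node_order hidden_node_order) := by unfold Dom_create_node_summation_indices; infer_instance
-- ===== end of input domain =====

-- B replaces A's nested scan (each main node rescans all hidden nodes) by one grouping pass
-- over the hidden nodes into a dict keyed by the '__'-prefix, then one lookup per main node.


-- s.split('__')[0]  (split? with a nonempty separator is always `some` and nonempty)
def pvPrefix (s : String) : String := ((PySem.Str.split? s "__").getD [""]).headD ""

-- ===== PORT A =====
def create_node_summation_indices (main_node_order : List String) (hidden_node_order : List String) : List (List Int) :=
  main_node_order.foldl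
    (fun sum_tuple_main main_node =>
      sum_tuple_main ++
        [(PySem.List.pyRange 0 (PySem.List.len hidden_node_order) 1).foldl
          (fun tup_i node_ind =>
            if pvPrefix (PySem.List.pyGetD hidden_node_order node_ind "") == main_node then
              tup_i ++ [node_ind]
            else tup_i) []])
    []

-- ===== PORT B =====
def pvGroups (hidden_node_order : List String) : PySem.Dict String (List Int) :=
  (PySem.List.enumerate hidden_node_order).foldl
    (fun groups p => groups.modify (pvPrefix p.2) [] (fun l => l ++ [p.1]))
    (PySem.Dict.mk [])

def create_node_summation_indices_alt (main_node_order : List String) (hidden_node_order : List String) : List (List Int) :=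
  main_node_order.map (fun m => (pvGroups hidden_node_order).getD m [])

-- ===== PRECONDITION & SPEC =====
def Spec_create_node_summation_indices (main_node_order : List String) (hidden_node_order : List String) (out : List (List Int)) : Prop := out = create_node_summation_indices_alt main_node_order hidden_node_order
instance (main_node_order : List String) (hidden_node_order : List String) (out : List (List Int)) : Decidable (Spec_create_node_summation_indices main_node_order hidden_node_order out) := by unfold Spec_create_node_summation_indices; infer_instance

-- ===== CLAIM (what is proved, stated in full; the proofs are below) =====
def Claim_equal_create_node_summation_indices : Prop := ∀ (main_node_order : List String) (hidden_node_order : List String), Dom_create_node_summation_indices main_node_order hidden_node_order → Spec_create_node_summation_indices main_node_order hidden_node_order (create_node_summation_indices main_node_order hidden_node_order)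

-- ===== LEMMAS AND PROOFS =====

-- dict-grouping invariant: after folding the pairs `l` into dict `d`, the entry at `m`
-- is the old entry extended by the indices of `l` whose prefix is `m`
theorem pvGroups_getD_invariant (l : List (Int × String)) (d : PySem.Dict String (List Int)) (m : String) :
    (l.foldl (fun groups p => groups.modify (pvPrefix p.2) [] (fun t => t ++ [p.1])) d).getD m [] =
      l.foldl (fun tup p => if pvPrefix p.2 == m then tup ++ [p.1] else tup) (d.getD m []) := by
  induction l generalizing d with
  | nil => rfl
  | cons x xs ih =>
    simp only [List.foldl_cons, ih]
    rw [PySem.Dict.getD_modify]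
    by_cases h : m = pvPrefix x.2
    · simp [h]
    · simp [h, Ne.symm h, beq_iff_eq]

-- A's inner loop over indices equals the same fold over the enumeration
theorem pvInner_eq_enum (hidden : List String) (m : String) :
    (PySem.List.pyRange 0 (PySem.List.len hidden) 1).foldl
        (fun tup i => if pvPrefix (PySem.List.pyGetD hidden i "") == m then tup ++ [i] else tup) [] =
      (PySem.List.enumerate hidden).foldl
        (fun tup p => if pvPrefix p.2 == m then tup ++ [p.1] else tup) [] := by
  rw [PySem.List.enumerate_eq_map_pyRange hidden "", List.foldl_map]

-- ===== VERDICT (by name: the statement is the Claim_ definition above) =====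
theorem create_node_summation_indices_spec : Claim_equal_create_node_summation_indices := by
  intro main hidden _
  unfold Spec_create_node_summation_indices create_node_summation_indices create_node_summation_indices_alt
  rw [PySem.List.foldl_append_singleton_eq_map, List.nil_append]
  apply List.map_congr_left
  intro m _
  rw [pvInner_eq_enum, pvGroups]
  rw [pvGroups_getD_invariant]
  rfl
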